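-- pv_equiv track=rewrite | github.com/akinori020321/FastWeights | KV_COS/kv_cos_Anorm/figure/plot_head_clean_heatmap.py | build_class_groups
-- ===== SOURCE A (Python) =====
-- def build_class_groups(col_kinds, col_cids):
--     """
--     clean 側の (kind, class_id) からクラス列を作る。
--     wait(-1) は除外。kind も一応 bind/value/query 以外は除外。
--     """
--     idx_by_class = {}
--     for j, (k, cid) in enumerate(zip(col_kinds, col_cids)):
--         cid = int(cid)
--         if cid < 0:
--             continue
--         if k not in ("bind", "value", "query"):
--             continue
--         idx_by_class.setdefault(cid, []).append(j)
--
--     classes = sorted(idx_by_class.keys())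
--     return classes, idx_by_class
-- ===== SOURCE B (Python) =====
-- def build_class_groups(col_kinds, col_cids):
--     # One filtering pass building (cid, j) pairs, then a dedup for the key
--     # order and a per-class comprehension -- no dict mutation via setdefault.
--     pairs = [(int(cid), j)
--              for j, (k, cid) in enumerate(zip(col_kinds, col_cids))
--              if int(cid) >= 0 and k in ("bind", "value", "query")]
--     order = list(dict.fromkeys(c for c, _ in pairs))
--     idx_by_class = {c: [j for cc, j in pairs if cc == c] for c in order}
--     return sorted(order), idx_by_class
-- ===== Notes on version B (the rewrite author's own statement) =====
-- stated objective: alternative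
-- what changed: Replaces the single setdefault-append dict-mutation loop by a filter pass producing (cid, j) pairs, a dict.fromkeys dedup for the key order, and a per-class comprehension that collects each class's columns.
import Mathlib
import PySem

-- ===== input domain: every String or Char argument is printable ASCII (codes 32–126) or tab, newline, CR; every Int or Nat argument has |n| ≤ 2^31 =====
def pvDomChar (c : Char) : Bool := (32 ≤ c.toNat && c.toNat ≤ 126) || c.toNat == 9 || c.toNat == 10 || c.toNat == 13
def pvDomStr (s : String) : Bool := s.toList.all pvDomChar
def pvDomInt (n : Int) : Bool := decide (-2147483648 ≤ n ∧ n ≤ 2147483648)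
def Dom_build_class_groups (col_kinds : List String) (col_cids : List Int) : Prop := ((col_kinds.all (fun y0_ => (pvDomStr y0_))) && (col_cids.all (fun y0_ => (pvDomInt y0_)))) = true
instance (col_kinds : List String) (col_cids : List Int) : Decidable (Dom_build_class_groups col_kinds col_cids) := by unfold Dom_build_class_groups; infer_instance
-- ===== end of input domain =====

-- B trades A's setdefault/append dict-mutation loop for a filter pass producing (cid, j)
-- pairs, a first-occurrence dedup for the key order, and a per-class collection pass
-- (objective: alternative decomposition, same result).


-- ===== PORT A =====
-- d.setdefault(cid, []).append(j)  ≡  d[cid] = d.get(cid, []) + [j]  →  Dict.modify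
def build_class_groups (col_kinds : List String) (col_cids : List Int) : List Int × (List (Int × List Int)) :=
  let d := (PySem.List.enumerate (col_kinds.zip col_cids)).foldl
    (fun d p =>
      if p.2.2 < 0 then d
      else if ¬ (p.2.1 = "bind" ∨ p.2.1 = "value" ∨ p.2.1 = "query") then d
      else d.modify p.2.2 [] (fun l => l ++ [p.1]))
    PySem.Dict.empty
  (PySem.List.sorted d.keys (fun x => x) false, d.items)

-- ===== PORT B =====
def build_class_groups_alt (col_kinds : List String) (col_cids : List Int) : List Int × (List (Int × List Int)) :=
  let pairs := (PySem.List.enumerate (col_kinds.zip col_cids)).filterMap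
    (fun p => if 0 ≤ p.2.2 ∧ (p.2.1 = "bind" ∨ p.2.1 = "value" ∨ p.2.1 = "query")
              then some (p.2.2, p.1) else none)
  let order := PySem.List.dedup (pairs.map (·.1))
  let idx := order.map (fun c => (c, (pairs.filter (fun q => q.1 == c)).map (·.2)))
  (PySem.List.sorted order (fun x => x) false, idx)

-- ===== PRECONDITION & SPEC =====
def Spec_build_class_groups (col_kinds : List String) (col_cids : List Int) (out : List Int × (List (Int × List Int))) : Prop := out = build_class_groups_alt col_kinds col_cids
instance (col_kinds : List String) (col_cids : List Int) (out : List Int × (List (Int × List Int))) : Decidable (Spec_build_class_groups col_kinds col_cids out) := by unfold Spec_build_class_groups; infer_instance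

-- ===== CLAIM (what is proved, stated in full; the proofs are below) =====
def Claim_equal_build_class_groups : Prop := ∀ (col_kinds : List String) (col_cids : List Int), Dom_build_class_groups col_kinds col_cids → Spec_build_class_groups col_kinds col_cids (build_class_groups col_kinds col_cids)

-- ===== LEMMAS AND PROOFS =====

-- A's guarded grouping foldl is the grouping foldl over the filterMap of kept (cid, j) pairs
theorem foldl_guard_filterMap (l : List (Int × String × Int)) (acc : PySem.Dict Int (List Int)) :
    l.foldl (fun d p =>
        if 0 ≤ p.2.2 ∧ (p.2.1 = "bind" ∨ p.2.1 = "value" ∨ p.2.1 = "query")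
        then d.modify p.2.2 [] (fun v => v ++ [p.1]) else d) acc
      = (l.filterMap (fun p =>
          if 0 ≤ p.2.2 ∧ (p.2.1 = "bind" ∨ p.2.1 = "value" ∨ p.2.1 = "query")
          then some (p.2.2, p.1) else none)).foldl
          (fun d q => d.modify q.1 [] (fun v => v ++ [q.2])) acc := by
  induction l generalizing acc with
  | nil => rfl
  | cons x t ih =>
    by_cases h : 0 ≤ x.2.2 ∧ (x.2.1 = "bind" ∨ x.2.1 = "value" ∨ x.2.1 = "query") <;>
      simp [h, ih]

theorem build_class_groups_spec : Claim_equal_build_class_groups := by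
  intro ks cs _
  unfold Spec_build_class_groups build_class_groups build_class_groups_alt
  dsimp only
  -- name the filtered pair list
  set pairs : List (Int × Int) := (PySem.List.enumerate (ks.zip cs)).filterMap
    (fun p => if 0 ≤ p.2.2 ∧ (p.2.1 = "bind" ∨ p.2.1 = "value" ∨ p.2.1 = "query")
              then some (p.2.2, p.1) else none) with hpairs
  -- rewrite A's guarded step into the guard/transform shape
  have hstep : (fun (d : PySem.Dict Int (List Int)) (p : Int × String × Int) =>
      if p.2.2 < 0 then d
      else if ¬ (p.2.1 = "bind" ∨ p.2.1 = "value" ∨ p.2.1 = "query") then d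
      else d.modify p.2.2 [] (fun l => l ++ [p.1]))
    = (fun d p =>
        if 0 ≤ p.2.2 ∧ (p.2.1 = "bind" ∨ p.2.1 = "value" ∨ p.2.1 = "query")
        then d.modify p.2.2 [] (fun v => v ++ [p.1])
        else d) := by
    funext d p
    by_cases h1 : p.2.2 < 0
    · have hc : ¬ (0 ≤ p.2.2 ∧ (p.2.1 = "bind" ∨ p.2.1 = "value" ∨ p.2.1 = "query")) :=
        fun h => absurd h.1 (by omega)
      simp [h1, hc]
    · by_cases h2 : (p.2.1 = "bind" ∨ p.2.1 = "value" ∨ p.2.1 = "query")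
      · have h0 : (0:Int) ≤ p.2.2 := by omega
        simp [h1, h2, h0]
      · simp [h1, h2]
  rw [hstep, foldl_guard_filterMap, ← hpairs]
  set D : PySem.Dict Int (List Int) :=
    pairs.foldl (fun d q => d.modify q.1 [] (fun l => l ++ [q.2])) PySem.Dict.empty with hD
  have hnd : D.keys.Nodup := by
    rw [hD]
    exact PySem.Dict.nodup_keys_foldl_modify_key pairs Prod.fst []
      (fun _ q l => l ++ [q.2]) PySem.Dict.empty (by simp)
  have hkeys : D.keys = PySem.List.dedup (pairs.map (·.1)) := by
    rw [hD]
    have := PySem.Dict.keys_foldl_modify_key pairs Prod.fst []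
      (fun _ q l => l ++ [q.2]) (PySem.Dict.empty (κ := Int) (ν := List Int))
    rw [this, PySem.Dict.keys_empty, PySem.Set.update_nil_left, PySem.List.dedup_eq_ofList]
  have hg : ∀ c, D.getD c [] = (pairs.filter (fun q => q.1 == c)).map (·.2) := by
    intro c
    rw [hD, PySem.Dict.getD_foldl_modify_append, PySem.Dict.getD_empty]
    simp
  have hitems : D.items
      = (PySem.List.dedup (pairs.map (·.1))).map
          (fun c => (c, (pairs.filter (fun q => q.1 == c)).map (·.2))) := by
    rw [PySem.Dict.items_eq_map_keys D hnd [], hkeys]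
    exact List.map_congr_left (fun c _ => by rw [hg c])
  rw [hitems, hkeys]

-- ===== VERDICT (by name: the statement is the Claim_ definition above) =====
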